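-- pv_equiv track=rewrite | github.com/space-wizards/space-station-14 | tools/midi2piano/midi2piano.py | reduce_score_to_chords
-- ===== SOURCE A (Python) =====
-- def reduce_score_to_chords(score):
--     """
--     Reforms score into a chord-duration list:
--     [[chord_notes], duration_of_chord]
--     and returns it
--     """
--     new_score = []
--     new_chord = [[], 0]
--     # [ [chord notes], duration of chord ]
--     for event in score:
--         new_chord[0].append(event[1]) # Append new note to the chord
--         if event[0] == 0:
--             continue # Add new notes to the chord until non-zero duration is hit
--         new_chord[1] = event[0] # This is the duration of chord
--         new_score.append(new_chord) # Append chord to the list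
--         new_chord = [[], 0] # Reset the chord
--     return new_score
-- ===== SOURCE B (Python) =====
-- def reduce_score_to_chords(score):
--     """
--     Reforms score into a chord-duration list:
--     [[chord_notes], duration_of_chord]
--     and returns it
--     """
--     new_score = []
--     rest = score
--     while rest:
--         b = next((i for i, event in enumerate(rest) if event[0] != 0), None)
--         if b is None:
--             break  # trailing notes with no terminating duration are dropped
--         new_score.append([[event[1] for event in rest[:b + 1]], rest[b][0]])
--         rest = rest[b + 1:]
--     return new_score
-- ===== Notes on version B (the rewrite author's own statement) =====
-- stated objective: alternative
-- what changed: Instead of a single pass that accumulates a mutable chord event by event, B repeatedly finds the next boundary (first event with non-zero duration), slices the chord out in one go and recurses on the remainder; trailing un-terminated notes fall out naturally.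
import Mathlib
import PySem

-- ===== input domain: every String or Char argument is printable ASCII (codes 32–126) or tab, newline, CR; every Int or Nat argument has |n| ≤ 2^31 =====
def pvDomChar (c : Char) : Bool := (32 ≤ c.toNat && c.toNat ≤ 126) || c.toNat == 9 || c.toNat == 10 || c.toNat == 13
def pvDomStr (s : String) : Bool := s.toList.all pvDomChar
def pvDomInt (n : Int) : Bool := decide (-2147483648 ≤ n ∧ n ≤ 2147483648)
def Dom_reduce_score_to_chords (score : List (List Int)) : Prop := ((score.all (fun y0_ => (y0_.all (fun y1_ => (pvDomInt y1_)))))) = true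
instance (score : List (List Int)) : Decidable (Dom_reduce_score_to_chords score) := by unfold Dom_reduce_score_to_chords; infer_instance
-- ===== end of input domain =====

-- B replaces A's single pass with a mutable chord accumulator by repeated find-next-boundary + slice on the remainder (alternative decomposition, same cost); equivalence is about the return value.

-- ===== PORT A =====
-- state: (new_score, new_chord) with new_chord = (notes, duration)
def reduce_score_to_chords (score : List (List Int)) : List (List Int × Int) :=
  (score.foldl
    (fun (acc : List (List Int × Int) × List Int × Int) event =>
      let notes' := acc.2.1 ++ [PySem.List.pyGetD event (1 : Int) 0]
      if PySem.List.pyGetD event (0 : Int) 0 = 0 then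
        (acc.1, notes', acc.2.2)
      else
        (acc.1 ++ [(notes', PySem.List.pyGetD event (0 : Int) 0)], [], 0))
    ([], [], 0)).1

-- ===== PORT B =====
-- while rest: find first boundary b (event[0] != 0); slice the chord rest[:b+1]; continue on rest[b+1:]
def pvP (ev : List Int) : Bool := decide (PySem.List.pyGetD ev (0 : Int) 0 ≠ 0)

def pvAltGo : List (List Int) → List (List Int × Int)
  | [] => []
  | e :: t =>
    match (e :: t).findIdx? pvP with
    | none => []
    | some b =>
        (((e :: t).take (b + 1)).map (fun ev => PySem.List.pyGetD ev (1 : Int) 0),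
         PySem.List.pyGetD (PySem.List.pyGetD (e :: t) (b : Int) []) (0 : Int) 0)
        :: pvAltGo ((e :: t).drop (b + 1))
  termination_by xs => xs.length
  decreasing_by simp

def reduce_score_to_chords_alt (score : List (List Int)) : List (List Int × Int) :=
  pvAltGo score

-- ===== PRECONDITION & SPEC =====
-- A raises IndexError (event[1]) on any inner event list with fewer than two elements; exactly those inputs are excluded.
def Pre_reduce_score_to_chords (score : List (List Int)) : Prop :=
  ∀ e ∈ score, 2 ≤ e.length
instance (score : List (List Int)) : Decidable (Pre_reduce_score_to_chords score) := by
  unfold Pre_reduce_score_to_chords; infer_instance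

def pvWitness_reduce_score_to_chords : List (List Int) := [[0, 60], [2, 61], [0, 5], [1, 62]]

def Spec_reduce_score_to_chords (score : List (List Int)) (out : List (List Int × Int)) : Prop := out = reduce_score_to_chords_alt score
instance (score : List (List Int)) (out : List (List Int × Int)) : Decidable (Spec_reduce_score_to_chords score out) := by unfold Spec_reduce_score_to_chords; infer_instance

-- ===== CLAIM (what is proved, stated in full; the proofs are below) =====
def Claim_equal_reduce_score_to_chords : Prop := ∀ (score : List (List Int)), Dom_reduce_score_to_chords score → Pre_reduce_score_to_chords score → Spec_reduce_score_to_chords score (reduce_score_to_chords score)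

-- ===== LEMMAS AND PROOFS =====

-- recursive characterisation of A's loop
def pvLoopRec : List (List Int) → List Int → List (List Int × Int)
  | [], _ => []
  | e :: t, notes =>
    if PySem.List.pyGetD e (0 : Int) 0 = 0 then
      pvLoopRec t (notes ++ [PySem.List.pyGetD e (1 : Int) 0])
    else
      (notes ++ [PySem.List.pyGetD e (1 : Int) 0], PySem.List.pyGetD e (0 : Int) 0) :: pvLoopRec t []

theorem pvFoldl_eq_loopRec (xs : List (List Int)) :
    ∀ (out : List (List Int × Int)) (notes : List Int) (d : Int),
      (xs.foldl
        (fun (acc : List (List Int × Int) × List Int × Int) event =>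
          let notes' := acc.2.1 ++ [PySem.List.pyGetD event (1 : Int) 0]
          if PySem.List.pyGetD event (0 : Int) 0 = 0 then
            (acc.1, notes', acc.2.2)
          else
            (acc.1 ++ [(notes', PySem.List.pyGetD event (0 : Int) 0)], [], 0))
        (out, notes, d)).1 = out ++ pvLoopRec xs notes := by
  induction xs with
  | nil => intro out notes d; simp [pvLoopRec]
  | cons e t ih =>
    intro out notes d
    by_cases h : PySem.List.pyGetD e (0 : Int) 0 = 0 <;>
      simp [pvLoopRec, h, ih]

theorem pvLoopRec_nil_of_all_zero (xs : List (List Int)) :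
    ∀ notes, (∀ x ∈ xs, PySem.List.pyGetD x (0 : Int) 0 = 0) → pvLoopRec xs notes = [] := by
  induction xs with
  | nil => intro _ _; rfl
  | cons e t ih =>
    intro notes h
    have he : PySem.List.pyGetD e (0 : Int) 0 = 0 := h e (by simp)
    simp only [pvLoopRec, he]
    exact ih _ (fun x hx => h x (by simp [hx]))

theorem pvLoopRec_boundary (xs : List (List Int)) :
    ∀ notes,
      pvLoopRec xs notes =
        match xs.findIdx? pvP with
        | none => []
        | some b =>
            (notes ++ (xs.take (b + 1)).map (fun ev => PySem.List.pyGetD ev (1 : Int) 0),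
             PySem.List.pyGetD (PySem.List.pyGetD xs (b : Int) []) (0 : Int) 0)
            :: pvLoopRec (xs.drop (b + 1)) [] := by
  induction xs with
  | nil => intro notes; rfl
  | cons e t ih =>
    intro notes
    by_cases he : PySem.List.pyGetD e (0 : Int) 0 = 0
    · have hpe : pvP e = false := by simp [pvP, he]
      rw [List.findIdx?_cons, hpe]
      simp only [Bool.false_eq_true, if_false]
      cases hf : t.findIdx? pvP with
      | none =>
        have hz : ∀ x ∈ t, PySem.List.pyGetD x (0 : Int) 0 = 0 := by
          intro x hx
          have hnx := List.findIdx?_eq_none_iff.mp hf x hx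
          simpa [pvP] using hnx
        simp only [pvLoopRec, he, Option.map_none]
        exact pvLoopRec_nil_of_all_zero t _ hz
      | some j =>
        simp only [Option.map_some]
        simp only [pvLoopRec, he, ih, hf]
        simp [PySem.List.pyGetD_natCast, List.take_succ_cons, List.drop_succ_cons,
          List.append_assoc]
        have hc : ((j : Int) + 1) = ((j + 1 : Nat) : Int) := by push_cast; ring
        rw [hc, PySem.List.pyGetD_natCast]
        simp [List.getD]
    · have hpe : pvP e = true := by simp [pvP, he]
      rw [List.findIdx?_cons, hpe]
      simp only [pvLoopRec, he]
      simp

theorem pvAltGo_eq_loopRec_aux :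
    ∀ (n : Nat) (xs : List (List Int)), xs.length ≤ n → pvAltGo xs = pvLoopRec xs [] := by
  intro n
  induction n with
  | zero =>
    intro xs h
    have hx : xs = [] := List.eq_nil_of_length_eq_zero (Nat.le_zero.mp h)
    subst hx; simp [pvAltGo, pvLoopRec]
  | succ n ih =>
    intro xs h
    cases xs with
    | nil => simp [pvAltGo, pvLoopRec]
    | cons e t =>
      rw [pvAltGo, pvLoopRec_boundary]
      cases hf : (e :: t).findIdx? pvP with
      | none => rfl
      | some b =>
        simp only []
        rw [ih _ (by simp at h ⊢; omega)]
        simp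

theorem pvAltGo_eq_loopRec (xs : List (List Int)) : pvAltGo xs = pvLoopRec xs [] :=
  pvAltGo_eq_loopRec_aux xs.length xs le_rfl

-- ===== VERDICT (by name: the statement is the Claim_ definition above) =====
theorem reduce_score_to_chords_spec : Claim_equal_reduce_score_to_chords := by
  intro score _ _
  unfold Spec_reduce_score_to_chords reduce_score_to_chords reduce_score_to_chords_alt
  rw [pvFoldl_eq_loopRec, pvAltGo_eq_loopRec]
  simp
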